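-- pv_equiv track=rewrite | github.com/mitrofjr/TPE_func | utils.py | get_human_readable_reaction
-- ===== SOURCE A (Python) =====
-- def get_human_readable_reaction(indexes, mols):
--     reaction = str()
--
--     for i, (ind, mol) in enumerate(zip(indexes, mols)):
--         if i != 0:
--             if indexes[i] * indexes[i - 1] < 0:
--                 reaction += ' => '
--             else:
--                 reaction += ' + '
--
--         if abs(ind) != 1:
--             reaction += str(ind)
--
--         reaction += mol
--
--     return reaction
-- ===== SOURCE B (Python) =====
-- def get_human_readable_reaction(indexes, mols):
--     pairs = list(zip(indexes, mols))
--     terms = [(str(ind) if abs(ind) != 1 else '') + mol for ind, mol in pairs]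
--     runs = []
--     cur = []
--     prev = None
--     for (ind, _), term in zip(pairs, terms):
--         if prev is not None and prev * ind < 0:
--             runs.append(cur)
--             cur = []
--         cur.append(term)
--         prev = ind
--     if cur:
--         runs.append(cur)
--     return ' => '.join(' + '.join(run) for run in runs)
-- ===== Notes on version B (the rewrite author's own statement) =====
-- stated objective: alternative
-- what changed: A builds the string in one flat loop choosing a separator per step; B first maps each (coef, mol) pair to a term string, partitions the terms into contiguous runs broken at sign changes of the coefficient product, and renders with a two-level ' => '.join of ' + '.join(run).
import Mathlib
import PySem

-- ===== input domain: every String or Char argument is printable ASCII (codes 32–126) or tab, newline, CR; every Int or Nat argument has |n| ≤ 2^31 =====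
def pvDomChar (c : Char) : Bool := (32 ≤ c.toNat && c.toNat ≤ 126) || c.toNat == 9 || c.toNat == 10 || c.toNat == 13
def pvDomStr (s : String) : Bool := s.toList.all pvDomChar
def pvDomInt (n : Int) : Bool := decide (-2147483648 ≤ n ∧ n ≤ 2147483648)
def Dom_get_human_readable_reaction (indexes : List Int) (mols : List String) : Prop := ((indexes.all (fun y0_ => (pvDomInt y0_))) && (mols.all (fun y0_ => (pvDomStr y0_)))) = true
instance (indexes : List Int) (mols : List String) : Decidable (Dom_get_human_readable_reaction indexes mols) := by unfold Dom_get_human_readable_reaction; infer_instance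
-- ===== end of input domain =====

-- B rewrites A's flat loop (per-step separator choice) as: map each pair to a term string,
-- split the terms into runs broken at coefficient sign changes, then a two-level
-- ' => ' / ' + ' join (alternative decomposition, same cost).

-- ===== PORT A =====
-- the loop body of A, named; indexes[i] and indexes[i-1] are always in range here
-- (0 ≤ i-1 < i < len(zip(indexes, mols)) ≤ len(indexes)), so pyGetD's default 0 is never used
def pvAStep (indexes : List Int) (reaction : String) (q : Int × (Int × String)) : String :=
  let r1 := if q.1 ≠ 0 then
      (if PySem.List.pyGetD indexes q.1 0 * PySem.List.pyGetD indexes (q.1 - 1) 0 < 0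
       then reaction ++ " => " else reaction ++ " + ")
    else reaction
  let r2 := if q.2.1.natAbs ≠ 1 then r1 ++ PySem.Int.toStr q.2.1 else r1
  r2 ++ q.2.2

def get_human_readable_reaction (indexes : List Int) (mols : List String) : String :=
  (PySem.List.enumerate (indexes.zip mols) 0).foldl (pvAStep indexes) ""

-- ===== PORT B =====
-- term string for one (coefficient, molecule) pair
def pvTerm (q : Int × String) : String :=
  (if q.1.natAbs ≠ 1 then PySem.Int.toStr q.1 else "") ++ q.2

-- the loop body of B, named: state = (runs, cur, prev)
def pvBStep (st : List (List String) × List String × Option Int)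
    (qt : (Int × String) × String) : List (List String) × List String × Option Int :=
  match st.2.2 with
  | some p => if p * qt.1.1 < 0 then (st.1 ++ [st.2.1], [qt.2], some qt.1.1)
              else (st.1, st.2.1 ++ [qt.2], some qt.1.1)
  | none => (st.1, st.2.1 ++ [qt.2], some qt.1.1)

def get_human_readable_reaction_alt (indexes : List Int) (mols : List String) : String :=
  let pairs := indexes.zip mols
  let terms := pairs.map pvTerm
  let st := (pairs.zip terms).foldl pvBStep ([], [], none)
  let runs := if st.2.1 ≠ [] then st.1 ++ [st.2.1] else st.1
  PySem.Str.join " => " (runs.map (fun run => PySem.Str.join " + " run))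

-- ===== PRECONDITION & SPEC =====
def Spec_get_human_readable_reaction (indexes : List Int) (mols : List String) (out : String) : Prop := out = get_human_readable_reaction_alt indexes mols
instance (indexes : List Int) (mols : List String) (out : String) : Decidable (Spec_get_human_readable_reaction indexes mols out) := by unfold Spec_get_human_readable_reaction; infer_instance

-- ===== CLAIM (what is proved, stated in full; the proofs are below) =====
def Claim_equal_get_human_readable_reaction : Prop := ∀ (indexes : List Int) (mols : List String), Dom_get_human_readable_reaction indexes mols → Spec_get_human_readable_reaction indexes mols (get_human_readable_reaction indexes mols)

-- ===== LEMMAS AND PROOFS =====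

-- canonical middle form both programs are reduced to:
-- first term, then for each later pair a separator chosen from the previous coefficient plus its term
def pvSep (prev ind : Int) : String := if ind * prev < 0 then " => " else " + "

def pvT (prev : Int) : List (Int × String) → String
  | [] => ""
  | q :: rest => pvSep prev q.1 ++ (pvTerm q ++ pvT q.1 rest)

def pvC : List (Int × String) → String
  | [] => ""
  | q :: rest => pvTerm q ++ pvT q.1 rest

-- rendering of B's list of runs
def pvR (runs : List (List String)) : String :=
  PySem.Str.join " => " (runs.map (fun run => PySem.Str.join " + " run))

lemma pv_join_nil (sep : String) : PySem.Str.join sep [] = "" := rfl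

lemma pv_join_cons (sep x : String) (xs : List String) :
    PySem.Str.join sep (x :: xs) = x ++ (if xs = [] then "" else sep ++ PySem.Str.join sep xs) := by
  cases xs <;> simp [PySem.Str.join, PySem.Chars.join_cons_cons]

lemma pv_join_snoc (sep y : String) (xs : List String) :
    PySem.Str.join sep (xs ++ [y]) = PySem.Str.join sep xs ++ (if xs = [] then "" else sep) ++ y := by
  induction xs with
  | nil => simp [pv_join_cons, pv_join_nil]
  | cons x xs ih =>
    rw [List.cons_append, pv_join_cons, ih, pv_join_cons (xs := xs)]
    cases xs <;> simp [String.append_assoc, pv_join_nil]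

lemma pvR_snoc (rs : List (List String)) (c : List String) :
    pvR (rs ++ [c]) = pvR rs ++ (if rs = [] then "" else " => ") ++ PySem.Str.join " + " c := by
  simp only [pvR, List.map_append, List.map_cons, List.map_nil, pv_join_snoc]
  cases rs <;> simp

lemma pvT_snoc (l : List (Int × String)) (prev : Int) (p : Int × String) :
    pvT prev (l ++ [p]) =
      pvT prev l ++ (pvSep ((l.getLast?.map Prod.fst).getD prev) p.1 ++ pvTerm p) := by
  induction l generalizing prev with
  | nil => simp [pvT]
  | cons q l ih =>
    rw [List.cons_append]
    show pvSep prev q.1 ++ (pvTerm q ++ pvT q.1 (l ++ [p])) = _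
    rw [ih]
    cases l with
    | nil => simp [pvT, String.append_assoc]
    | cons r t =>
      rcases h : (r :: t).getLast? with _ | a
      · simp at h
      · simp [pvT, String.append_assoc, List.getLast?_cons_cons, h]

lemma pvC_snoc (q : Int × String) (rest : List (Int × String)) (p : Int × String) :
    pvC ((q :: rest) ++ [p]) =
      pvC (q :: rest) ++ (pvSep (((q :: rest).getLast?.map Prod.fst).getD 0) p.1 ++ pvTerm p) := by
  show pvTerm q ++ pvT q.1 (rest ++ [p]) = _
  rw [pvT_snoc]
  cases rest with
  | nil => simp [pvC, String.append_assoc]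
  | cons r t =>
    rcases h : (r :: t).getLast? with _ | a
    · simp at h
    · simp [pvC, String.append_assoc, List.getLast?_cons_cons, h]

lemma pv_zip_map (l : List (Int × String)) :
    l.zip (l.map pvTerm) = l.map (fun q => (q, pvTerm q)) := by
  induction l with
  | nil => rfl
  | cons q l ih => simp [ih]

-- loop invariant of B: with a nonempty current run and a previous coefficient p,
-- finishing the loop and rendering appends exactly the canonical tail pvT p l
lemma pvB_loop (l : List (Int × String)) :
    ∀ (runs : List (List String)) (cur : List String) (p : Int), cur ≠ [] →
      pvR (let st := (l.map (fun q => (q, pvTerm q))).foldl pvBStep (runs, cur, some p);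
           if st.2.1 ≠ [] then st.1 ++ [st.2.1] else st.1)
        = pvR (runs ++ [cur]) ++ pvT p l := by
  induction l with
  | nil => intro runs cur p hcur; simp [pvT, hcur]
  | cons q l ih =>
    intro runs cur p hcur
    simp only [List.map_cons, List.foldl_cons, pvBStep]
    by_cases h : p * q.1 < 0
    · rw [if_pos h]
      rw [ih (runs ++ [cur]) [pvTerm q] q.1 (by simp)]
      rw [pvR_snoc (runs ++ [cur]) [pvTerm q]]
      have hsep : pvSep p q.1 = " => " := by simp [pvSep, mul_comm, h]
      simp [pvT, hsep, pv_join_cons, String.append_assoc]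
    · rw [if_neg h]
      rw [ih runs (cur ++ [pvTerm q]) q.1 (by simp)]
      rw [pvR_snoc runs (cur ++ [pvTerm q]), pvR_snoc runs cur, pv_join_snoc]
      have hsep : pvSep p q.1 = " + " := by
        simp only [pvSep, mul_comm q.1 p]; rw [if_neg h]
      simp [pvT, hsep, hcur, String.append_assoc]

lemma pvB_eq_C (indexes : List Int) (mols : List String) :
    get_human_readable_reaction_alt indexes mols = pvC (indexes.zip mols) := by
  show PySem.Str.join " => " ((let st := ((indexes.zip mols).zip ((indexes.zip mols).map pvTerm)).foldl pvBStep ([], [], none);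
      if st.2.1 ≠ [] then st.1 ++ [st.2.1] else st.1).map (fun run => PySem.Str.join " + " run)) = _
  rw [pv_zip_map]
  cases h : indexes.zip mols with
  | nil => simp [pvC, pv_join_nil]
  | cons q l =>
    show pvR (let st := (l.map (fun q => (q, pvTerm q))).foldl pvBStep ([], [pvTerm q], some q.1);
         if st.2.1 ≠ [] then st.1 ++ [st.2.1] else st.1) = pvC (q :: l)
    rw [pvB_loop l [] [pvTerm q] q.1 (by simp)]
    simp [pvC, pvR, pv_join_cons]

-- A's fold over the first n enumerated pairs equals the canonical form of the first n pairs
lemma pvA_fold (indexes : List Int) (mols : List String) :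
    ∀ n, n ≤ (indexes.zip mols).length →
      (PySem.List.enumerate ((indexes.zip mols).take n) 0).foldl (pvAStep indexes) ""
        = pvC ((indexes.zip mols).take n) := by
  intro n
  induction n with
  | zero => intro _; rfl
  | succ k ih =>
    intro h
    have hk : k < (indexes.zip mols).length := by omega
    have hki : k < indexes.length := by have h2 := hk; simp only [List.length_zip] at h2; omega
    have htake : (indexes.zip mols).take (k+1) = (indexes.zip mols).take k ++ [(indexes.zip mols)[k]] := by
      rw [List.take_add_one]; simp [List.getElem?_eq_getElem hk]
    rw [htake, PySem.List.enumerate_append, List.foldl_append, ih (by omega)]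
    have hlen : ((indexes.zip mols).take k).length = k := by simp only [List.length_take]; omega
    rw [hlen]
    simp only [PySem.List.enumerate_cons, PySem.List.enumerate_nil, List.foldl_cons, List.foldl_nil]
    have hzk : (indexes.zip mols)[k].1 = indexes[k] := by simp
    cases k with
    | zero =>
      simp only [List.take_zero, List.nil_append]
      show pvAStep indexes (pvC []) (0 + (0:Int), (indexes.zip mols)[0]) = pvC [(indexes.zip mols)[0]]
      simp only [pvAStep, pvC, pvT, pvTerm]
      norm_num
    | succ j =>
      have hj : j < (indexes.zip mols).length := by omega
      have hji : j < indexes.length := by omega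
      rcases hc : (indexes.zip mols).take (j+1) with _ | ⟨q, rest⟩
      · exfalso
        have : ((indexes.zip mols).take (j+1)).length = j+1 := by simp only [List.length_take]; omega
        rw [hc] at this; simp at this
      · rw [hc] at hlen
        rw [pvC_snoc]
        have hlast : ((q :: rest).getLast?.map Prod.fst).getD 0 = indexes[j] := by
          rw [← hc, List.getLast?_eq_getElem?]
          have hl2 : (List.take (j+1) (indexes.zip mols)).length = j+1 := by
            simp only [List.length_take]; omega
          rw [hl2]
          simp only [Nat.add_sub_cancel]
          rw [List.getElem?_take_of_lt (by omega)]
          rw [List.getElem?_eq_getElem hj]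
          simp
        rw [hlast]
        show pvAStep indexes (pvC (q :: rest)) (0 + ((j:Int)+1), (indexes.zip mols)[j+1]) = _
        have hne : (0 + ((j:Int)+1)) ≠ 0 := by omega
        have hidx1 : (0 + ((j:Int)+1)) = ((j+1 : Nat) : Int) := by push_cast [Nat.cast_add]; ring
        have hidx2 : (0 + ((j:Int)+1)) - 1 = ((j : Nat) : Int) := by omega
        simp only [pvAStep, hne, ite_not, hidx2]
        rw [hidx1]
        rw [PySem.List.pyGetD_natCast, PySem.List.pyGetD_natCast]
        rw [List.getD_eq_getElem _ _ (by omega), List.getD_eq_getElem _ _ hji]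
        simp only [pvSep, pvTerm, hzk]
        split_ifs <;> simp [String.append_assoc] <;> simp_all

lemma pvA_eq_C (indexes : List Int) (mols : List String) :
    get_human_readable_reaction indexes mols = pvC (indexes.zip mols) := by
  have h := pvA_fold indexes mols (indexes.zip mols).length le_rfl
  rw [List.take_length] at h
  exact h

-- ===== VERDICT (by name: the statement is the Claim_ definition above) =====
theorem get_human_readable_reaction_spec : Claim_equal_get_human_readable_reaction := by
  intro indexes mols _
  unfold Spec_get_human_readable_reaction
  rw [pvA_eq_C, pvB_eq_C]
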